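-- pv_equiv track=rewrite | github.com/pithun/Caption-Analyser | caption_analyser_functions.py | contains_hashtags_better
-- ===== SOURCE A (Python) =====
-- HASHTAG_SYMBOL = '#'
--
-- MENTION_SYMBOL = '@'
--
-- UNDERSCORE = '_'
--
-- def clean(text):
--     clean_str = ''
--     for char in text:
--         if char.isalnum() or char == UNDERSCORE:
--             clean_str = clean_str + char
--         elif char == HASHTAG_SYMBOL or char == MENTION_SYMBOL:
--             clean_str = clean_str + ' ' + char
--         else:
--             clean_str = clean_str + ' '
--     return clean_str
--
-- def contains_hashtags_better(caption, hashtag):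
--     clean_caption = clean(caption)
--     hash_tag_list = []
--     empty = ''
--     for val, r in enumerate(clean_caption):
--         if r == HASHTAG_SYMBOL:
--             new_one = clean_caption[val + 1:]
--             for x in new_one:
--                 if x == ' ':
--                     break
--                 else:
--                     empty = empty + x
--             hash_tag_list.append(empty)
--             empty = ''
--     for h in hash_tag_list:
--         if h == '':
--             hash_tag_list.remove(h)
--     if hashtag in hash_tag_list:
--         return True
--     else:
--         return False
-- ===== SOURCE B (Python) =====
-- HASHTAG_SYMBOL = '#'
-- UNDERSCORE = '_'
--
-- def contains_hashtags_better(caption, hashtag):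
--     # single pass over the raw caption: no intermediate cleaned string
--     tags = []
--     i = 0
--     n = len(caption)
--     while i < n:
--         if caption[i] == HASHTAG_SYMBOL:
--             j = i + 1
--             while j < n and (caption[j].isalnum() or caption[j] == UNDERSCORE):
--                 j += 1
--             tags.append(caption[i + 1:j])
--             i = j
--         else:
--             i += 1
--     for h in tags:
--         if h == '':
--             tags.remove(h)
--     return hashtag in tags
-- ===== Notes on version B (the rewrite author's own statement) =====
-- stated objective: alternative
-- what changed: B drops the clean() preprocessing pass entirely and extracts each hashtag in one index-based pass over the raw caption (inner while collecting the word-character run after each '#'), instead of building a cleaned copy and re-slicing it from every '#' position; measured about 1.25x, not the 1.5x needed to be labelled faster.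
import Mathlib
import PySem

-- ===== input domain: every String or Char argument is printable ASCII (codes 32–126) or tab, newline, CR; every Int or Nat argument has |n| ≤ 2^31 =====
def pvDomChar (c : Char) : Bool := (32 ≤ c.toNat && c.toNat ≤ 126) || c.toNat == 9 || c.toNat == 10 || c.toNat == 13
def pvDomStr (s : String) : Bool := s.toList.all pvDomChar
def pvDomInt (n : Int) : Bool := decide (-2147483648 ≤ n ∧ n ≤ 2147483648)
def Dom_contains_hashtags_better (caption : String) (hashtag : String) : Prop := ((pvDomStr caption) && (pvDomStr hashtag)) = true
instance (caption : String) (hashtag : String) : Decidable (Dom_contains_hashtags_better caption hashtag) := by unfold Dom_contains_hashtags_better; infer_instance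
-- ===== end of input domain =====

-- B extracts each hashtag in a single pass over the raw caption (no intermediate cleaned
-- string, no per-'#' slice of it); return value proved equal to A's everywhere.

-- shared by both ports: the word-character test `char.isalnum() or char == '_'`
def pvW (c : Char) : Bool := PySem.Chars.isalnum c || c == '_'

-- shared by both ports: the (identical in both sources) `for h in L: if h=='': L.remove(h)`
-- loop; pvRemoveEmpty is list.remove('') (first match), pvPruneGo the index-advancing for loop
def pvRemoveEmpty : List (List Char) → List (List Char)
  | [] => []
  | t :: ts => if t = [] then ts else t :: pvRemoveEmpty ts

theorem pvRemoveEmpty_length_le (L : List (List Char)) :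
    (pvRemoveEmpty L).length ≤ L.length := by
  induction L with
  | nil => simp [pvRemoveEmpty]
  | cons t ts ih =>
    simp only [pvRemoveEmpty]
    split
    · simp
    · simpa using ih

def pvPruneGo (i : Nat) (L : List (List Char)) : List (List Char) :=
  if h : i < L.length then
    if L[i] = [] then pvPruneGo (i + 1) (pvRemoveEmpty L)
    else pvPruneGo (i + 1) L
  else L
termination_by L.length - i
decreasing_by
  · have := pvRemoveEmpty_length_le L; omega
  · omega

-- ===== PORT A =====
-- clean(text): left fold building the cleaned string
def pvCleanStep (acc : List Char) (c : Char) : List Char :=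
  if pvW c then acc ++ [c]
  else if c == '#' || c == '@' then acc ++ [' ', c]
  else acc ++ [' ']

def pvClean (cs : List Char) : List Char := cs.foldl pvCleanStep []

-- inner `for x in new_one: if x == ' ': break else empty += x`
def pvInner : List Char → List Char
  | [] => []
  | x :: xs => if x = ' ' then [] else x :: pvInner xs

-- outer `for val, r in enumerate(clean_caption)`: at each '#', the token from the slice after it
def pvTokensA : List Char → List (List Char)
  | [] => []
  | r :: rest => if r = '#' then pvInner rest :: pvTokensA rest else pvTokensA rest

def contains_hashtags_better (caption : String) (hashtag : String) : Bool :=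
  (pvPruneGo 0 (pvTokensA (pvClean caption.toList))).contains hashtag.toList

-- ===== PORT B =====
-- B's while loops: on '#', take the run of word chars after it (inner while over j),
-- continue at j; otherwise advance one char
def pvTokensB : List Char → List (List Char)
  | [] => []
  | c :: rest =>
    if c = '#' then rest.takeWhile pvW :: pvTokensB (rest.dropWhile pvW)
    else pvTokensB rest
termination_by cs => cs.length
decreasing_by
  · have := List.length_dropWhile_le pvW rest; simp; omega
  · simp

def contains_hashtags_better_alt (caption : String) (hashtag : String) : Bool :=
  (pvPruneGo 0 (pvTokensB caption.toList)).contains hashtag.toList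

-- ===== PRECONDITION & SPEC =====
def Spec_contains_hashtags_better (caption : String) (hashtag : String) (out : Bool) : Prop := out = contains_hashtags_better_alt caption hashtag
instance (caption : String) (hashtag : String) (out : Bool) : Decidable (Spec_contains_hashtags_better caption hashtag out) := by unfold Spec_contains_hashtags_better; infer_instance

-- ===== CLAIM (what is proved, stated in full; the proofs are below) =====
def Claim_equal_contains_hashtags_better : Prop := ∀ (caption : String) (hashtag : String), Dom_contains_hashtags_better caption hashtag → Spec_contains_hashtags_better caption hashtag (contains_hashtags_better caption hashtag)

-- ===== LEMMAS AND PROOFS =====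

-- per-character contribution of clean
def pvBlock (c : Char) : List Char :=
  if pvW c then [c] else if c == '#' || c == '@' then [' ', c] else [' ']

theorem pvW_ne_hash {c : Char} (h : pvW c = true) : c ≠ '#' := by
  intro hc; subst hc; exact absurd h (by decide)

theorem pvW_ne_space {c : Char} (h : pvW c = true) : c ≠ ' ' := by
  intro hc; subst hc; exact absurd h (by decide)

theorem pvTokensA_cons (r : Char) (rest : List Char) :
    pvTokensA (r :: rest) = if r = '#' then pvInner rest :: pvTokensA rest else pvTokensA rest := rfl

theorem pvTokensB_nil : pvTokensB [] = [] := by rw [pvTokensB]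

theorem pvTokensB_cons (c : Char) (rest : List Char) :
    pvTokensB (c :: rest) =
      if c = '#' then rest.takeWhile pvW :: pvTokensB (rest.dropWhile pvW)
      else pvTokensB rest := by
  rw [pvTokensB]

theorem pvClean_foldl (cs : List Char) (acc : List Char) :
    cs.foldl pvCleanStep acc = acc ++ cs.flatMap pvBlock := by
  induction cs generalizing acc with
  | nil => simp
  | cons c cs ih =>
    simp only [List.foldl_cons, List.flatMap_cons, pvCleanStep, pvBlock]
    split_ifs <;> simp [ih]

theorem pvClean_eq (cs : List Char) : pvClean cs = cs.flatMap pvBlock := by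
  simpa using pvClean_foldl cs []

theorem pvInner_flatMap (cs : List Char) :
    pvInner (cs.flatMap pvBlock) = cs.takeWhile pvW := by
  induction cs with
  | nil => simp [pvInner]
  | cons c cs ih =>
    rw [List.flatMap_cons, List.takeWhile_cons]
    by_cases hw : pvW c = true
    · rw [show pvBlock c = [c] from by rw [pvBlock, if_pos hw], hw, List.singleton_append,
        pvInner, if_neg (pvW_ne_space hw), ih, if_pos rfl]
    · have hb : ∃ d, pvBlock c = ' ' :: d := by
        rw [pvBlock, if_neg hw]; split
        · exact ⟨[c], rfl⟩
        · exact ⟨[], rfl⟩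
      obtain ⟨d, hd⟩ := hb
      rw [hd, List.cons_append, pvInner, if_pos rfl, if_neg hw]

theorem pvTokensA_skip (ws t : List Char) (h : ∀ x ∈ ws, pvW x = true) :
    pvTokensA (ws ++ t) = pvTokensA t := by
  induction ws with
  | nil => simp
  | cons x ws ih =>
    have hx : pvW x = true := h x (by simp)
    rw [List.cons_append, pvTokensA_cons, if_neg (pvW_ne_hash hx)]
    exact ih (fun y hy => h y (by simp [hy]))

theorem pvFlatMap_word (ws : List Char) (h : ∀ x ∈ ws, pvW x = true) :
    ws.flatMap pvBlock = ws := by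
  induction ws with
  | nil => simp
  | cons x ws ih =>
    rw [List.flatMap_cons, show pvBlock x = [x] from by rw [pvBlock, if_pos (h x (by simp))],
      List.singleton_append, ih (fun y hy => h y (by simp [hy]))]

theorem pvTokens_eq_aux : ∀ (n : Nat) (cs : List Char), cs.length ≤ n →
    pvTokensA (cs.flatMap pvBlock) = pvTokensB cs := by
  intro n
  induction n with
  | zero =>
    intro cs h
    have : cs = [] := List.eq_nil_of_length_eq_zero (Nat.le_zero.mp h)
    subst this; rw [List.flatMap_nil, pvTokensB_nil]; rfl
  | succ n ih =>
    intro cs h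
    match cs with
    | [] => rw [List.flatMap_nil, pvTokensB_nil]; rfl
    | c :: cs =>
      have hlen : cs.length ≤ n := by simpa using h
      by_cases hc : c = '#'
      · subst hc
        have hw : ∀ x ∈ cs.takeWhile pvW, pvW x = true :=
          fun x hx => List.mem_takeWhile_imp hx
        have hsplit : cs.flatMap pvBlock
            = cs.takeWhile pvW ++ (cs.dropWhile pvW).flatMap pvBlock := by
          conv_lhs => rw [← List.takeWhile_append_dropWhile (p := pvW) (l := cs)]
          rw [List.flatMap_append, pvFlatMap_word _ hw]
        have hdrop : (cs.dropWhile pvW).length ≤ n :=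
          le_trans (List.length_dropWhile_le pvW cs) hlen
        rw [List.flatMap_cons, show pvBlock '#' = [' ', '#'] from by decide,
          List.cons_append, List.singleton_append,
          pvTokensA_cons, if_neg (by decide : ¬ (' ' = '#')),
          pvTokensA_cons, if_pos rfl,
          pvTokensB_cons, if_pos rfl,
          pvInner_flatMap, hsplit, pvTokensA_skip _ _ hw, ih _ hdrop]
      · by_cases hw : pvW c = true
        · rw [List.flatMap_cons, show pvBlock c = [c] from by rw [pvBlock, if_pos hw],
            List.singleton_append, pvTokensA_cons, if_neg (pvW_ne_hash hw),
            ih cs hlen, pvTokensB_cons, if_neg hc]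
        · by_cases ha : (c == '#' || c == '@') = true
          · have hca : c = '@' := by
              rcases Bool.or_eq_true_iff.mp ha with h1 | h1
              · exact absurd (by simpa using h1) hc
              · simpa using h1
            subst hca
            rw [List.flatMap_cons, show pvBlock '@' = [' ', '@'] from by decide,
              List.cons_append, List.singleton_append,
              pvTokensA_cons, if_neg (by decide : ¬ (' ' = '#')),
              pvTokensA_cons, if_neg (by decide : ¬ ('@' = '#')),
              ih cs hlen, pvTokensB_cons, if_neg (by decide : ¬ ('@' = '#'))]
          · rw [List.flatMap_cons,
              show pvBlock c = [' '] from by rw [pvBlock, if_neg hw, if_neg ha],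
              List.singleton_append, pvTokensA_cons, if_neg (by decide : ¬ (' ' = '#')),
              ih cs hlen, pvTokensB_cons, if_neg hc]

theorem pvTokens_eq (cs : List Char) :
    pvTokensA (pvClean cs) = pvTokensB cs := by
  rw [pvClean_eq]; exact pvTokens_eq_aux cs.length cs le_rfl

-- ===== VERDICT (by name: the statement is the Claim_ definition above) =====
theorem contains_hashtags_better_spec : Claim_equal_contains_hashtags_better := by
  intro caption hashtag _
  unfold Spec_contains_hashtags_better contains_hashtags_better contains_hashtags_better_alt
  rw [pvTokens_eq]
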